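-- pv_equiv track=rewrite | github.com/Lightblues/Leetcode | contest/atcoder/Beginner Contest 259/c.py | f
-- ===== SOURCE A (Python) =====
-- def f(s: str):
--     # 尝试将 s,t 都缩减. 但有问题, 因为 s 只能加字符不能减
--     ans = "";
--     last = ""; cnt = 0
--     for ch in s+" ":
--         if ch!=last:
--             last = ch; cnt = 1
--         else:
--             if cnt>=2: continue
--             cnt += 1
--         ans += ch
--     return ans
-- ===== SOURCE B (Python) =====
-- def f(s: str):
--     # runs-first: scan each maximal run with two indices, emit at most 2 copies of it
--     t = s + " "
--     n = len(t)
--     parts = []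
--     i = 0
--     while i < n:
--         j = i
--         while j < n and t[j] == t[i]:
--             j += 1
--         parts.append(t[i] * min(2, j - i))
--         i = j
--     return "".join(parts)
-- ===== Notes on version B (the rewrite author's own statement) =====
-- stated objective: alternative
-- what changed: Replaced A's char-by-char state machine (tracking last char and a count, skipping the third-and-later repeats) by a runs-first two-index scan that finds each maximal run and emits at most two copies of its character.
import Mathlib
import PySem

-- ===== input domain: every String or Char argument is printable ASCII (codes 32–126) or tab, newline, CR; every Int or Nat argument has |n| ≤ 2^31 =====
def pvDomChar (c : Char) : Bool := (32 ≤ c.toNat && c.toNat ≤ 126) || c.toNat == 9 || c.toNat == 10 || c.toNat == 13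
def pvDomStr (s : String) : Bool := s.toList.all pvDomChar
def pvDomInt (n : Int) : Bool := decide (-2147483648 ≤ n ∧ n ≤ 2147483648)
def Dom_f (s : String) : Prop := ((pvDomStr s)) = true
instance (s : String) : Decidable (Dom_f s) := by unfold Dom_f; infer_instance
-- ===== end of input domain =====

-- B replaces A's char-by-char last/cnt state machine by a runs-first scan that emits
-- at most two copies of each maximal run (objective: alternative decomposition, same cost).

-- ===== PORT A =====
-- state = (ans, last, cnt); Python's initial last = "" (matches no single char) is `none`
def fStep (st : List Char × Option Char × Int) (ch : Char) : List Char × Option Char × Int :=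
  if some ch ≠ st.2.1 then (st.1 ++ [ch], some ch, 1)
  else if st.2.2 ≥ 2 then st
  else (st.1 ++ [ch], st.2.1, st.2.2 + 1)

def f (s : String) : String :=
  String.mk ((s.toList ++ [' ']).foldl fStep ([], none, 0)).1

-- ===== PORT B =====
-- the inner `while t[j]==t[i]` scan of Source B: each maximal run as (its char, its length)
def runsB (l : List Char) : List (Char × Nat) :=
  match l with
  | [] => []
  | c :: t => (c, 1 + (t.takeWhile (· == c)).length) :: runsB (t.dropWhile (· == c))
termination_by l.length
decreasing_by
  simp only [List.length_cons]
  exact Nat.lt_succ_of_le (List.length_dropWhile_le _ _)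

def f_alt (s : String) : String :=
  String.mk ((runsB (s.toList ++ [' '])).flatMap (fun p => List.replicate (min 2 p.2) p.1))

-- ===== PRECONDITION & SPEC =====
def Spec_f (s : String) (out : String) : Prop := out = f_alt s
instance (s : String) (out : String) : Decidable (Spec_f s out) := by unfold Spec_f; infer_instance

-- ===== CLAIM (what is proved, stated in full; the proofs are below) =====
def Claim_equal_f : Prop := ∀ (s : String), Dom_f s → Spec_f s (f s)

-- ===== LEMMAS AND PROOFS =====

-- the characters A's loop emits from state (last, cnt)
def emitP (last : Option Char) (cnt : Int) : List Char → List Char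
  | [] => []
  | c :: t =>
    if some c ≠ last then c :: emitP (some c) 1 t
    else if cnt ≥ 2 then emitP last cnt t
    else c :: emitP last (cnt + 1) t

theorem fold_emit (l : List Char) : ∀ (ans : List Char) (last : Option Char) (cnt : Int),
    (l.foldl fStep (ans, last, cnt)).1 = ans ++ emitP last cnt l := by
  induction l with
  | nil => intro ans last cnt; simp [emitP]
  | cons c t ih =>
    intro ans last cnt
    simp only [List.foldl_cons, fStep, emitP]
    split_ifs with h1 h2 <;> simp [ih]

theorem emitP_indep (l : List Char) (c : Char) (cnt cnt' : Int)
    (h : l.head? ≠ some c) : emitP (some c) cnt l = emitP (some c) cnt' l := by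
  cases l with
  | nil => rfl
  | cons d t =>
    have : some d ≠ some c := by simpa using h
    simp [emitP, this]

theorem emitP_skip (k : Nat) (c : Char) (rest : List Char) (cnt : Int) (h : cnt ≥ 2) :
    emitP (some c) cnt (List.replicate k c ++ rest) = emitP (some c) cnt rest := by
  induction k with
  | zero => simp
  | succ n ih => simp [List.replicate_succ, emitP, h, ih]

theorem emitP_consume (k : Nat) (c : Char) (rest : List Char) (h : rest.head? ≠ some c) :
    emitP (some c) 1 (List.replicate k c ++ rest)
      = List.replicate (min 1 k) c ++ emitP (some c) 0 rest := by
  cases k with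
  | zero => simpa using emitP_indep rest c 1 0 h
  | succ n =>
    have h2 : (2 : Int) ≥ 2 := le_refl 2
    simp only [List.replicate_succ, List.cons_append, emitP]
    rw [if_neg (by simp), if_neg (by norm_num)]
    rw [show (1 : Int) + 1 = 2 from rfl, emitP_skip n c rest 2 h2,
      emitP_indep rest c 2 0 h]
    simp

def flatB (l : List Char) : List Char :=
  (runsB l).flatMap (fun p => List.replicate (min 2 p.2) p.1)

theorem emitP_eq_flatB : ∀ (n : Nat) (l : List Char), l.length ≤ n →
    ∀ (last : Option Char) (cnt : Int), (∀ c, l.head? = some c → last ≠ some c) →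
    emitP last cnt l = flatB l := by
  intro n
  induction n with
  | zero =>
    intro l hl last cnt _
    have : l = [] := List.eq_nil_of_length_eq_zero (Nat.le_zero.mp hl)
    subst this; simp [emitP, flatB, runsB]
  | succ n ih =>
    intro l hl last cnt hhead
    cases l with
    | nil => simp [emitP, flatB, runsB]
    | cons c t =>
      have hne : some c ≠ last := fun h => hhead c rfl h.symm
      have hsplit : t = t.takeWhile (· == c) ++ t.dropWhile (· == c) :=
        (List.takeWhile_append_dropWhile).symm
      set k := (t.takeWhile (· == c)).length with hk
      have hrep : t.takeWhile (· == c) = List.replicate k c := by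
        rw [List.eq_replicate_iff]
        refine ⟨rfl, fun b hb => ?_⟩
        have := List.mem_takeWhile_imp hb
        simpa using this
      have hdhead : (t.dropWhile (· == c)).head? ≠ some c := by
        intro h
        have := List.head?_dropWhile_not (p := (· == c)) (l := t)
        rw [h] at this
        simp at this
      have hlen : (t.dropWhile (· == c)).length ≤ n := by
        have h1 := List.length_dropWhile_le (· == c) t
        simp only [List.length_cons] at hl
        omega
      have hdrop : emitP (some c) 0 (t.dropWhile (· == c)) = flatB (t.dropWhile (· == c)) := by
        refine ih _ hlen _ _ ?_
        intro d hd h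
        exact hdhead (by rw [hd, h])
      calc emitP last cnt (c :: t)
          = c :: emitP (some c) 1 t := by simp [emitP, hne]
        _ = c :: emitP (some c) 1 (List.replicate k c ++ t.dropWhile (· == c)) := by
            rw [← hrep, ← hsplit]
        _ = c :: (List.replicate (min 1 k) c ++ emitP (some c) 0 (t.dropWhile (· == c))) := by
            rw [emitP_consume k c _ hdhead]
        _ = List.replicate (min 2 (1 + k)) c ++ flatB (t.dropWhile (· == c)) := by
            rw [hdrop]
            have hm : min 2 (1 + k) = 1 + min 1 k := by omega
            rw [hm, List.replicate_add]
            simp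
        _ = flatB (c :: t) := by
            simp only [flatB]
            conv_rhs => rw [runsB.eq_def]
            simp [hk]

-- ===== VERDICT (by name: the statement is the Claim_ definition above) =====
theorem f_spec : Claim_equal_f := by
  intro s _
  unfold Spec_f f f_alt
  rw [fold_emit]
  have := emitP_eq_flatB (s.toList ++ [' ']).length (s.toList ++ [' ']) le_rfl none 0
    (by intro c _; simp)
  simp only [List.nil_append, this]
  rfl
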